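-- pv_equiv track=rewrite | github.com/dsipakou/codewars | del_occ.py | occ
-- ===== SOURCE A (Python) =====
-- def occ(order, max_e):
--     output = []
--     d = {}
--     for i in order:
--         d[i] = d.get(i, 0)
--         d[i] += 1
--         if d[i] <= max_e:
--             output.append(i)
--     return(output)
-- ===== SOURCE B (Python) =====
-- def occ(order, max_e):
--     # For each distinct value, collect the positions where it occurs, keep only
--     # the first max_e of them, then sort all kept positions and read the
--     # elements back off in position order.
--     limit = max(max_e, 0)
--     keep = []
--     for v in set(order):
--         idxs = [i for i, y in enumerate(order) if y == v]
--         keep.extend(idxs[:limit])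
--     keep.sort()
--     return [order[i] for i in keep]
-- ===== Notes on version B (the rewrite author's own statement) =====
-- stated objective: alternative
-- what changed: Replaced the single stateful pass with a running counter dict by a group-and-sort algorithm: for each distinct value collect its occurrence positions, slice off the first max_e of them, sort the union of kept positions and map them back to elements.
import Mathlib
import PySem

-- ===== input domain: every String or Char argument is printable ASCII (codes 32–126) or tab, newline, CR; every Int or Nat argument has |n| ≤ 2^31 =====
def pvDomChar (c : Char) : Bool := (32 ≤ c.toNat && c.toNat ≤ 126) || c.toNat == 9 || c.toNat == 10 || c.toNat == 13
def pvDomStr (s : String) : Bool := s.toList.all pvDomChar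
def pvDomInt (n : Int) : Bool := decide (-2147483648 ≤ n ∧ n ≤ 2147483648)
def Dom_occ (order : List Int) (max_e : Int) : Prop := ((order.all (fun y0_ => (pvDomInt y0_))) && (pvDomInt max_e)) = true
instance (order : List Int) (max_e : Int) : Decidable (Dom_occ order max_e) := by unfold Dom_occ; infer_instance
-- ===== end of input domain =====

-- B replaces A's stateful counter-dict filtering pass by a group-and-sort algorithm:
-- per distinct value it collects the occurrence positions, keeps the first max_e of
-- them, sorts the union of kept positions and reads the elements back off (alternative, not faster).

-- ===== PORT A =====
-- output/d are the loop state; each step does d[i] = d.get(i, 0); d[i] += 1; append when d[i] <= max_e.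
def occ (order : List Int) (max_e : Int) : List Int :=
  (order.foldl (fun (st : List Int × PySem.Dict Int Int) i =>
      let d1 := st.2.insert i (st.2.getD i 0)
      let d2 := d1.insert i (d1.getD i 0 + 1)
      let output := if d2.getD i 0 ≤ max_e then st.1 ++ [i] else st.1
      (output, d2))
    ([], PySem.Dict.empty)).1

-- ===== PORT B =====
-- limit = max(max_e, 0); for v in set(order): idxs = [i for i, y in enumerate(order) if y == v];
-- keep.extend(idxs[:limit]); keep.sort(); return [order[i] for i in keep].
-- The final comprehension's order[i] is ported with pyGet? (every kept i is in range, so it never hits none).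
def occ_alt (order : List Int) (max_e : Int) : List Int :=
  let limit := max max_e 0
  let keep := (PySem.Set.ofList order).foldl
    (fun acc v =>
      let idxs := (PySem.List.enumerate order 0).filterMap
        (fun p => if p.2 = v then some p.1 else none)
      acc ++ PySem.List.slice idxs none (some limit)) []
  (PySem.List.sorted keep (fun i => i)).filterMap (fun i => PySem.List.pyGet? order i)

-- ===== PRECONDITION & SPEC =====
def Spec_occ (order : List Int) (max_e : Int) (out : List Int) : Prop := out = occ_alt order max_e
instance (order : List Int) (max_e : Int) (out : List Int) : Decidable (Spec_occ order max_e out) := by unfold Spec_occ; infer_instance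

-- ===== CLAIM (what is proved, stated in full; the proofs are below) =====
def Claim_equal_occ : Prop := ∀ (order : List Int) (max_e : Int), Dom_occ order max_e → Spec_occ order max_e (occ order max_e)

-- ===== LEMMAS AND PROOFS =====

-- Characterisation of A: keep x from the suffix iff pre.count x + 1 ≤ max_e, extending pre as we go.
def pvKeep (max_e : Int) (pre l : List Int) : List Int :=
  match l with
  | [] => []
  | x :: xs =>
    (if (pre.count x : Int) + 1 ≤ max_e then [x] else []) ++ pvKeep max_e (pre ++ [x]) xs

-- The common middle form: the kept positions, in increasing order.
def pvIdx (order : List Int) (max_e : Int) : List Nat :=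
  (List.range order.length).filter
    (fun k => decide ((order.take k).count (order.getD k 0) < (max max_e 0).toNat))

theorem occ_foldl_eq_keep (max_e : Int) (l : List Int) :
    ∀ (pre acc : List Int) (d : PySem.Dict Int Int),
      (∀ x : Int, d.getD x 0 = (pre.count x : Int)) →
      ((l.foldl (fun (st : List Int × PySem.Dict Int Int) i =>
          let d1 := st.2.insert i (st.2.getD i 0)
          let d2 := d1.insert i (d1.getD i 0 + 1)
          let output := if d2.getD i 0 ≤ max_e then st.1 ++ [i] else st.1
          (output, d2))
        (acc, d)).1) = acc ++ pvKeep max_e pre l := by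
  induction l with
  | nil => intro pre acc d _; simp [pvKeep]
  | cons x xs ih =>
    intro pre acc d hd
    simp only [List.foldl_cons]
    have hx2 : ∀ y : Int,
        (((d.insert x (d.getD x 0)).insert x ((d.insert x (d.getD x 0)).getD x 0 + 1)).getD y 0)
          = ((pre ++ [x]).count y : Int) := by
      intro y
      by_cases hyx : y = x
      · subst hyx
        simp [PySem.Dict.getD_insert_self, hd, List.count_append]
      · simp [PySem.Dict.getD_insert, hyx, hd, List.count_append, Ne.symm hyx]
    have hxx : (((d.insert x (d.getD x 0)).insert x ((d.insert x (d.getD x 0)).getD x 0 + 1)).getD x 0)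
        = (pre.count x : Int) + 1 := by
      simp [PySem.Dict.getD_insert_self, hd]
    rw [ih (pre ++ [x]) _ _ hx2]
    simp only [pvKeep, hxx]
    by_cases hc : (pre.count x : Int) + 1 ≤ max_e <;> simp [hc]

-- pvKeep, re-read as a filter of the position range.
theorem keep_eq_idx_map (order : List Int) (max_e : Int) :
    ∀ (l : List Int) (k : Nat), k ≤ order.length → order.drop k = l →
      pvKeep max_e (order.take k) l
        = ((List.range' k (order.length - k)).filter
            (fun j => decide ((order.take j).count (order.getD j 0) < (max max_e 0).toNat))).map
            (fun j => order.getD j 0) := by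
  intro l
  induction l with
  | nil =>
    intro k hk hdrop
    have : order.length - k = 0 := by
      have := congrArg List.length hdrop
      simp at this
      omega
    simp [pvKeep, this]
  | cons x xs ih =>
    intro k hk hdrop
    have hklt : k < order.length := by
      by_contra h
      have : order.drop k = [] := List.drop_eq_nil_of_le (by omega)
      simp [this] at hdrop
    have hxk : order[k] = x := by
      have := List.drop_eq_getElem_cons hklt
      rw [hdrop] at this
      exact (List.cons.injEq _ _ _ _ ▸ this).1.symm
    have hdrop' : order.drop (k + 1) = xs := by
      have := List.drop_eq_getElem_cons hklt
      rw [hdrop, hxk] at this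
      exact (List.cons.injEq _ _ _ _ ▸ this).2.symm
    have hsub : order.length - k = (order.length - (k + 1)) + 1 := by omega
    rw [hsub, List.range'_succ]
    have hgd : order.getD k 0 = x := by rw [List.getD_eq_getElem order 0 hklt, hxk]
    rw [List.filter_cons]
    have hrec := ih (k + 1) (by omega) hdrop'
    have htake : order.take (k + 1) = order.take k ++ [x] := by
      rw [← hxk]; exact List.take_succ_eq_append_getElem hklt
    rw [htake] at hrec
    have hunfold : pvKeep max_e (order.take k) (x :: xs)
        = (if ((order.take k).count x : Int) + 1 ≤ max_e then [x] else [])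
            ++ pvKeep max_e (order.take k ++ [x]) xs := rfl
    rw [hunfold, hrec]
    by_cases hc : ((order.take k).count x : Int) + 1 ≤ max_e
    · have hd : decide ((order.take k).count (order.getD k 0) < (max max_e 0).toNat) = true := by
        rw [hgd]; simp only [decide_eq_true_eq]; omega
      rw [if_pos hc]
      rw [if_pos hd, List.map_cons]
      simp only [hgd]
      rfl
    · have hd : decide ((order.take k).count (order.getD k 0) < (max max_e 0).toNat) = false := by
        rw [hgd]; simp only [decide_eq_false_iff_not]; omega
      rw [if_neg hc]
      rw [if_neg (show ¬ (decide ((order.take k).count (order.getD k 0) < (max max_e 0).toNat) = true)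
        from by rw [hd]; simp)]
      rfl

-- Group of a value, re-read as a filter of the position range (shifted by the start).
theorem grp_eq (v : Int) :
    ∀ (l : List Int) (s : Int),
      (PySem.List.enumerate l s).filterMap (fun p => if p.2 = v then some p.1 else none)
        = ((List.range l.length).filter (fun k => decide (l.getD k 0 = v))).map
            (fun (k : Nat) => s + (k : Int)) := by
  intro l
  induction l with
  | nil => intro s; simp [PySem.List.enumerate]
  | cons x xs ih =>
    intro s
    have hcomp : ((fun k => decide ((x :: xs).getD k 0 = v)) ∘ Nat.succ)
        = (fun k => decide (xs.getD k 0 = v)) := by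
      funext k
      simp
    have hmap : ∀ F : List Nat, (F.map Nat.succ).map (fun (k : Nat) => s + (k : Int))
        = F.map (fun (k : Nat) => (s + 1) + (k : Int)) := by
      intro F
      rw [List.map_map]
      apply List.map_congr_left
      intro k _
      simp only [Function.comp_apply, Nat.succ_eq_add_one]
      push_cast
      ring
    rw [PySem.List.enumerate_cons, List.filterMap_cons, ih (s + 1),
        List.length_cons, List.range_succ_eq_map, List.filter_cons, List.filter_map, hcomp]
    by_cases hx : x = v
    · have h0 : decide ((x :: xs).getD 0 0 = v) = true := by simp [hx]
      rw [if_pos h0, List.map_cons, hmap]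
      simp [hx]
    · have h0 : ¬ (decide ((x :: xs).getD 0 0 = v) = true) := by simp [hx]
      rw [if_neg h0, hmap]
      simp [hx]

-- Membership in a take of a strictly increasing list.
theorem mem_take_sorted (j : Nat) :
    ∀ (l : List Nat), l.Pairwise (· < ·) → ∀ (t : Nat),
      (j ∈ l.take t ↔ j ∈ l ∧ l.countP (fun a => decide (a < j)) < t) := by
  intro l hl
  induction l with
  | nil => intro t; simp
  | cons a l ih =>
    intro t
    have hal : ∀ b ∈ l, a < b := fun b hb => (List.pairwise_cons.mp hl).1 b hb
    have hl' : l.Pairwise (· < ·) := (List.pairwise_cons.mp hl).2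
    cases t with
    | zero => simp
    | succ t =>
      by_cases hja : j = a
      · subst hja
        have hz : l.countP (fun b => decide (b < j)) = 0 := by
          rw [List.countP_eq_zero]
          intro b hb
          have := hal b hb
          simp only [decide_eq_true_eq]
          omega
        simp [hz]
      · have hcnt : (a :: l).countP (fun b => decide (b < j))
            = l.countP (fun b => decide (b < j)) + (if a < j then 1 else 0) := by
          simp [List.countP_cons]
        by_cases hjl : j ∈ l
        · have haj : a < j := hal j hjl
          simp only [List.take_succ_cons, List.mem_cons, hja, false_or]
          rw [ih hl' t]
          constructor
          · rintro ⟨h1, h2⟩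
            exact ⟨h1, by rw [hcnt]; simp [haj]; omega⟩
          · rintro ⟨_, h2⟩
            rw [hcnt] at h2
            simp only [haj, if_pos] at h2
            exact ⟨hjl, by omega⟩
        · have h1 : j ∉ (a :: l).take (t + 1) := by
            intro hmem
            have hmem' : j = a ∨ j ∈ l.take t := by simpa using hmem
            rcases hmem' with h | h
            · exact hja h
            · exact hjl (List.mem_of_mem_take h)
          have h2 : j ∉ (a :: l) := by
            intro hmem
            rcases List.mem_cons.mp hmem with h | h
            · exact hja h
            · exact hjl h
          exact ⟨fun h => absurd h h1, fun h => absurd h.1 h2⟩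

-- Prefix counts via the position range.
theorem take_map_range (order : List Int) :
    ∀ (j : Nat), j ≤ order.length →
      (List.range j).map (fun k => order.getD k 0) = order.take j := by
  intro j
  induction j with
  | zero => intro _; simp
  | succ j ih =>
    intro hj
    have hjlt : j < order.length := by omega
    rw [List.range_succ, List.map_append, ih (by omega), List.take_add_one]
    simp [List.getElem?_eq_getElem hjlt]

theorem countP_range_filter (order : List Int) (v : Int) (j : Nat) (hj : j ≤ order.length) :
    ((List.range order.length).filter (fun k => decide (order.getD k 0 = v))).countP
        (fun a => decide (a < j))
      = (order.take j).count v := by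
  rw [List.countP_filter]
  have hsplit : order.length = j + (order.length - j) := by omega
  rw [hsplit, List.range_add, List.countP_append]
  have h2 : ((List.range (order.length - j)).map (fun x => j + x)).countP
      (fun a => decide (a < j) && decide (order.getD a 0 = v)) = 0 := by
    rw [List.countP_eq_zero]
    intro a ha
    rcases List.mem_map.mp ha with ⟨x, _, rfl⟩
    simp
  have h1 : (List.range j).countP (fun a => decide (a < j) && decide (order.getD a 0 = v))
      = (List.range j).countP (fun a => decide (order.getD a 0 = v)) := by
    apply List.countP_congr
    intro a ha
    have := List.mem_range.mp ha
    simp [this]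
  rw [h1, h2]
  rw [← take_map_range order j hj, List.count_eq_countP, List.countP_map]
  apply List.countP_congr
  intro a _
  simp [Function.comp, Bool.beq_eq_decide_eq]

-- Reading the elements back off a list of in-range positions.
theorem map_cast_filterMap_get (order : List Int) :
    ∀ ks : List Nat, (∀ k ∈ ks, k < order.length) →
      (ks.map (fun (k : Nat) => (k : Int))).filterMap (fun i => PySem.List.pyGet? order i)
        = ks.map (fun k => order.getD k 0) := by
  intro ks
  induction ks with
  | nil => intro _; simp
  | cons k ks ih =>
    intro h
    have hk : k < order.length := h k (by simp)
    rw [List.map_cons, List.map_cons, List.filterMap_cons]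
    rw [PySem.List.pyGet?_natCast, List.getElem?_eq_getElem hk]
    rw [ih (fun a ha => h a (by simp [ha]))]
    rw [List.getD_eq_getElem order 0 hk]

-- A's output as the filtered position range.
theorem occ_eq_idx (order : List Int) (max_e : Int) :
    occ order max_e
      = ((List.range order.length).filter
          (fun k => decide ((order.take k).count (order.getD k 0) < (max max_e 0).toNat))).map
          (fun j => order.getD j 0) := by
  unfold occ
  rw [occ_foldl_eq_keep max_e order [] [] PySem.Dict.empty
      (by intro x; simp [PySem.Dict.getD_empty])]
  have := keep_eq_idx_map order max_e order 0 (by omega) (by simp)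
  simpa [List.range_eq_range'] using this

-- B's output as the filtered position range.
theorem occ_alt_eq_idx (order : List Int) (max_e : Int) :
    occ_alt order max_e
      = ((List.range order.length).filter
          (fun k => decide ((order.take k).count (order.getD k 0) < (max max_e 0).toNat))).map
          (fun j => order.getD j 0) := by
  have hpair_rv : ∀ v : Int,
      ((List.range order.length).filter (fun k => decide (order.getD k 0 = v))).Pairwise (· < ·) :=
    fun v => List.Pairwise.sublist (List.filter_sublist) List.pairwise_lt_range
  have hnodup_rv : ∀ v : Int,
      ((List.range order.length).filter (fun k => decide (order.getD k 0 = v))).Nodup :=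
    fun v => List.Nodup.filter _ List.nodup_range
  -- the fold over the set, as a flatMap of per-value kept positions
  have hkeep : (PySem.Set.ofList order).foldl
      (fun acc v =>
        acc ++ PySem.List.slice
          ((PySem.List.enumerate order 0).filterMap (fun p => if p.2 = v then some p.1 else none))
          none (some (max max_e 0))) []
      = (PySem.Set.ofList order).flatMap
          (fun v => (((List.range order.length).filter
              (fun k => decide (order.getD k 0 = v))).take (max max_e 0).toNat).map
              (fun (k : Nat) => (k : Int))) := by
    rw [PySem.List.foldl_append_eq_flatMap, List.nil_append]
    apply congrArg (fun f => List.flatMap f (PySem.Set.ofList order))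
    funext v
    rw [grp_eq v order 0, PySem.List.slice_to _ (le_max_right _ _), ← List.map_take]
    apply List.map_congr_left
    intro k _
    simp
  -- the sorted kept positions are exactly the filtered position range
  have hsorted : PySem.List.sorted
      ((PySem.Set.ofList order).foldl
        (fun acc v =>
          acc ++ PySem.List.slice
            ((PySem.List.enumerate order 0).filterMap (fun p => if p.2 = v then some p.1 else none))
            none (some (max max_e 0))) [])
      (fun i => i)
      = ((List.range order.length).filter
          (fun k => decide ((order.take k).count (order.getD k 0) < (max max_e 0).toNat))).map
          (fun (k : Nat) => (k : Int)) := by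
    rw [hkeep]
    apply PySem.List.sorted_eq_of_perm_of_pairwise_lt
    · -- permutation, via nodup + same membership
      have hpair_idx : ((List.range order.length).filter
          (fun k => decide ((order.take k).count (order.getD k 0) < (max max_e 0).toNat))).Pairwise
            (· < ·) :=
        List.Pairwise.sublist (List.filter_sublist) List.pairwise_lt_range
      have hnodup_ys : (((List.range order.length).filter
          (fun k => decide ((order.take k).count (order.getD k 0) < (max max_e 0).toNat))).map
          (fun (k : Nat) => (k : Int))).Nodup := by
        apply List.Nodup.map (fun a b h => by exact_mod_cast h)
        exact List.Nodup.filter _ List.nodup_range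
      have hnodup_keep : ((PySem.Set.ofList order).flatMap
          (fun v => (((List.range order.length).filter
              (fun k => decide (order.getD k 0 = v))).take (max max_e 0).toNat).map
              (fun (k : Nat) => (k : Int)))).Nodup := by
        rw [List.nodup_flatMap]
        constructor
        · intro v _
          apply List.Nodup.map (fun a b h => by exact_mod_cast h)
          exact List.Sublist.nodup (List.take_sublist _ _) (hnodup_rv v)
        · apply List.Pairwise.imp _ (PySem.Set.nodup_ofList order)
          intro v w hvw a hav haw
          rcases List.mem_map.mp hav with ⟨j, hjv, rfl⟩
          rcases List.mem_map.mp haw with ⟨j', hjw, hjj⟩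
          have hj : j = j' := by exact_mod_cast hjj.symm
          subst hj
          have h1 : decide (order.getD j 0 = v) = true :=
            (List.mem_filter.mp (List.mem_of_mem_take hjv)).2
          have h2 : decide (order.getD j 0 = w) = true :=
            (List.mem_filter.mp (List.mem_of_mem_take hjw)).2
          have e1 : order.getD j 0 = v := decide_eq_true_eq.mp h1
          have e2 : order.getD j 0 = w := decide_eq_true_eq.mp h2
          exact hvw (by rw [← e1, ← e2])
      rw [List.perm_ext_iff_of_nodup hnodup_ys hnodup_keep]
      intro a
      constructor
      · intro ha
        rcases List.mem_map.mp ha with ⟨j, hj, rfl⟩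
        rcases List.mem_filter.mp hj with ⟨hjr, hjc⟩
        have hjn : j < order.length := List.mem_range.mp hjr
        have hcond : (order.take j).count (order.getD j 0) < (max max_e 0).toNat :=
          decide_eq_true_eq.mp hjc
        apply List.mem_flatMap.mpr
        refine ⟨order.getD j 0, ?_, ?_⟩
        · apply (PySem.Set.mem_ofList order _).mpr
          rw [List.getD_eq_getElem order 0 hjn]
          exact List.getElem_mem hjn
        · apply List.mem_map.mpr
          refine ⟨j, ?_, rfl⟩
          apply (mem_take_sorted j _ (hpair_rv (order.getD j 0)) _).mpr
          refine ⟨List.mem_filter.mpr ⟨hjr, by simp⟩, ?_⟩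
          rw [countP_range_filter order _ j (by omega)]
          exact hcond
      · intro ha
        rcases List.mem_flatMap.mp ha with ⟨v, hv, hmem⟩
        rcases List.mem_map.mp hmem with ⟨j, hjt, rfl⟩
        rcases (mem_take_sorted j _ (hpair_rv v) _).mp hjt with ⟨hjrv, hjcnt⟩
        rcases List.mem_filter.mp hjrv with ⟨hjr, hjv⟩
        have hjn : j < order.length := List.mem_range.mp hjr
        have hveq : order.getD j 0 = v := decide_eq_true_eq.mp hjv
        rw [countP_range_filter order v j (by omega)] at hjcnt
        apply List.mem_map.mpr
        refine ⟨j, ?_, rfl⟩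
        apply List.mem_filter.mpr
        exact ⟨hjr, by rw [hveq]; simpa using hjcnt⟩
    · -- strictly increasing
      rw [List.pairwise_map]
      apply List.Pairwise.imp _
        (List.Pairwise.sublist (List.filter_sublist) List.pairwise_lt_range)
      intro a b h
      exact_mod_cast h
  show (PySem.List.sorted _ (fun i => i)).filterMap (fun i => PySem.List.pyGet? order i) = _
  rw [hsorted]
  apply map_cast_filterMap_get
  intro k hk
  exact List.mem_range.mp (List.mem_filter.mp hk).1

-- ===== VERDICT (by name: the statement is the Claim_ definition above) =====
theorem occ_spec : Claim_equal_occ := by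
  intro order max_e _
  unfold Spec_occ
  rw [occ_eq_idx, occ_alt_eq_idx]
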